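-- pv_equiv track=rewrite | github.com/Dhiraj902/Dsa_Challenge_30_Days | day2.py | is_mountain_valley_pattern
-- ===== SOURCE A (Python) =====
-- def is_mountain_valley_pattern(arr):
--
--     n = len(arr)
--     if n == 1:
--         return 1
--
--     if arr[0] == arr[1]:
--         return 0
--
--     # Determine initial direction
--     increasing = arr[0] < arr[1]
--
--     for i in range(1, n - 1):
--         if arr[i] == arr[i + 1]:
--             return 0
--         if increasing:
--             if arr[i] <= arr[i + 1]:
--                 return 0
--         else:
--             if arr[i] >= arr[i + 1]:
--                 return 0
--         increasing = not increasing  # Flip direction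
--
--     return 1
-- ===== SOURCE B (Python) =====
-- def is_mountain_valley_pattern(arr):
--     n = len(arr)
--     if n == 1:
--         return 1
--     signs = [arr[i] < arr[i + 1] for i in range(n - 1)]
--     if any(arr[i] == arr[i + 1] for i in range(n - 1)):
--         return 0
--     if any(signs[j] == signs[j - 1] for j in range(1, n - 1)):
--         return 0
--     return 1
-- ===== Notes on version B (the rewrite author's own statement) =====
-- stated objective: alternative
-- what changed: Replaces A's single early-return loop threading a flipping 'increasing' accumulator with a precomputed comparison-signs table plus two separate any() scans (adjacent equality, non-alternating adjacent signs).
import Mathlib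
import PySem

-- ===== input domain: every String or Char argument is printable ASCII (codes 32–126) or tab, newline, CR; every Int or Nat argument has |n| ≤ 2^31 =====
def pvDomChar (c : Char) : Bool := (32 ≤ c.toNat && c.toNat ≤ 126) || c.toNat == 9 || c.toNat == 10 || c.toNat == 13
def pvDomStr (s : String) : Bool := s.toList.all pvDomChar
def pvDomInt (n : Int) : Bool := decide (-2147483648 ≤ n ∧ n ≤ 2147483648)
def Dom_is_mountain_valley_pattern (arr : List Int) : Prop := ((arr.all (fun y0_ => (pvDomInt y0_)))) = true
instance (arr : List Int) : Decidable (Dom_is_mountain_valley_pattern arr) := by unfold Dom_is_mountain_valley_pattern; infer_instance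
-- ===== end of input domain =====

-- B replaces A's flip-accumulator early-return loop with a precomputed signs table and two separate any-scans (alternative decomposition, same cost).

-- ===== PORT A =====
-- A's loop 'for i in range(1, n-1)' with its early returns, threading the flipping
-- 'increasing' flag; 'fuel' is the number of remaining loop iterations, (n-1) - i
def pvLoopA (arr : List Int) (increasing : Bool) (i : Nat) : Nat → Int
  | 0 => 1
  | fuel + 1 =>
    let x := arr.getD i 0
    let y := arr.getD (i+1) 0
    if x == y then 0
    else if increasing then
      if x ≤ y then 0 else pvLoopA arr (!increasing) (i+1) fuel
    else
      if y ≤ x then 0 else pvLoopA arr (!increasing) (i+1) fuel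

def is_mountain_valley_pattern (arr : List Int) : Int :=
  let n := arr.length
  if n == 1 then 1
  else
    match PySem.List.pyGet? arr 0, PySem.List.pyGet? arr 1 with
    | some a0, some a1 =>
      if a0 == a1 then 0
      else pvLoopA arr (decide (a0 < a1)) 1 (n - 2)
    | _, _ => 0   -- IndexError on the empty list: excluded by Pre_

-- ===== PORT B =====
def is_mountain_valley_pattern_alt (arr : List Int) : Int :=
  let n := arr.length
  if n == 1 then 1
  else
    let signs := (List.range (n - 1)).map (fun i => decide (arr.getD i 0 < arr.getD (i+1) 0))
    if (List.range (n - 1)).any (fun i => arr.getD i 0 == arr.getD (i+1) 0) then 0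
    else if (List.range' 1 (n - 1 - 1)).any (fun j => signs.getD j false == signs.getD (j-1) false) then 0
    else 1

-- ===== PRECONDITION & SPEC =====
-- Pre_ excludes only the empty list, on which A raises IndexError (it reads arr[0]).
def Pre_is_mountain_valley_pattern (arr : List Int) : Prop := arr ≠ []
instance (arr : List Int) : Decidable (Pre_is_mountain_valley_pattern arr) := by unfold Pre_is_mountain_valley_pattern; infer_instance
def pvWitness_is_mountain_valley_pattern : List Int := [1, 2]

def Spec_is_mountain_valley_pattern (arr : List Int) (out : Int) : Prop := out = is_mountain_valley_pattern_alt arr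
instance (arr : List Int) (out : Int) : Decidable (Spec_is_mountain_valley_pattern arr out) := by unfold Spec_is_mountain_valley_pattern; infer_instance

-- ===== CLAIM (what is proved, stated in full; the proofs are below) =====
def Claim_equal_is_mountain_valley_pattern : Prop := ∀ (arr : List Int), Dom_is_mountain_valley_pattern arr → Pre_is_mountain_valley_pattern arr → Spec_is_mountain_valley_pattern arr (is_mountain_valley_pattern arr)

-- ===== LEMMAS AND PROOFS =====
-- the comparison sign of the adjacent pair at position k (entry k of B's 'signs' table)
def pvSign (arr : List Int) (k : Nat) : Bool := decide (arr.getD k 0 < arr.getD (k+1) 0)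

-- characterisation of A's loop: started at i with 'increasing' equal to the previous
-- pair's sign and fuel = (n-1) - i, it returns 1 exactly when from i on all adjacent
-- pairs are unequal and the signs strictly alternate
lemma pvLoopA_eq_one_iff (arr : List Int) :
    ∀ (fuel : Nat) (inc : Bool) (i : Nat), 1 ≤ i → fuel = arr.length - 1 - i →
      inc = pvSign arr (i-1) →
      (pvLoopA arr inc i fuel = 1 ↔
        ∀ j, i ≤ j → j + 1 < arr.length →
          (arr.getD j 0 ≠ arr.getD (j+1) 0 ∧ pvSign arr j ≠ pvSign arr (j-1))) := by
  intro fuel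
  induction fuel with
  | zero =>
    intro inc i hi hf hinc
    constructor
    · intro _ j hj hj2; exact absurd hj2 (by omega)
    · intro _; rfl
  | succ fuel ih =>
    intro inc i hi hf hinc
    subst hinc
    simp only [pvLoopA]
    by_cases hxy : arr.getD i 0 = arr.getD (i + 1) 0
    · rw [if_pos (by simpa using hxy)]
      constructor
      · intro h01; exact absurd h01 (by norm_num)
      · intro hR; exact absurd hxy (hR i (Nat.le_refl _) (by omega)).1
    · rw [if_neg (by simpa using hxy)]
      cases h : pvSign arr (i - 1) with
      | true =>
        rw [if_pos rfl]
        by_cases hle : arr.getD i 0 ≤ arr.getD (i + 1) 0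
        · rw [if_pos hle]
          have hs : pvSign arr i = true := by
            unfold pvSign
            exact decide_eq_true (lt_of_le_of_ne hle hxy)
          constructor
          · intro h01; exact absurd h01 (by norm_num)
          · intro hR; exact absurd (by rw [hs, h]) (hR i (Nat.le_refl _) (by omega)).2
        · rw [if_neg hle]
          have hs : pvSign arr i = false := by
            unfold pvSign
            simp only [decide_eq_false_iff_not]
            exact fun hl => hle (le_of_lt hl)
          rw [ih (!true) (i+1) (by omega) (by omega) (by simp [hs])]
          constructor
          · intro hR j hj hj2
            rcases Nat.eq_or_lt_of_le hj with rfl | hj'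
            · exact ⟨hxy, by rw [hs, h]; simp⟩
            · exact hR j hj' hj2
          · intro hR j hj hj2; exact hR j (by omega) hj2
      | false =>
        rw [if_neg (by simp)]
        by_cases hge : arr.getD (i + 1) 0 ≤ arr.getD i 0
        · rw [if_pos hge]
          have hs : pvSign arr i = false := by
            unfold pvSign
            simp only [decide_eq_false_iff_not]
            intro hl; exact hxy (le_antisymm (le_of_lt hl) hge)
          constructor
          · intro h01; exact absurd h01 (by norm_num)
          · intro hR; exact absurd (by rw [hs, h]) (hR i (Nat.le_refl _) (by omega)).2
        · rw [if_neg hge]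
          have hs : pvSign arr i = true := by
            unfold pvSign
            exact decide_eq_true (lt_of_not_ge hge)
          rw [ih (!false) (i+1) (by omega) (by omega) (by simp [hs])]
          constructor
          · intro hR j hj hj2
            rcases Nat.eq_or_lt_of_le hj with rfl | hj'
            · exact ⟨hxy, by rw [hs, h]; simp⟩
            · exact hR j hj' hj2
          · intro hR j hj hj2; exact hR j (by omega) hj2

lemma pvLoopA_zero_or_one (arr : List Int) :
    ∀ (fuel : Nat) (inc : Bool) (i : Nat),
      pvLoopA arr inc i fuel = 0 ∨ pvLoopA arr inc i fuel = 1 := by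
  intro fuel
  induction fuel with
  | zero => intro inc i; right; rfl
  | succ fuel ih =>
    intro inc i
    simp only [pvLoopA]
    split_ifs <;> first | (left; rfl) | exact ih _ _

lemma pvSigns_getD (arr : List Int) (j : Nat) (h : j < arr.length - 1) :
    ((List.range (arr.length - 1)).map (fun i => decide (arr.getD i 0 < arr.getD (i+1) 0))).getD j false
      = pvSign arr j := by
  simp [List.getD_eq_getElem?_getD, h, pvSign]

lemma pv_main (arr : List Int) (hne : arr ≠ []) :
    is_mountain_valley_pattern arr = is_mountain_valley_pattern_alt arr := by
  match arr with
  | [a] => simp [is_mountain_valley_pattern, is_mountain_valley_pattern_alt]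
  | a0 :: a1 :: tl =>
    set arr := a0 :: a1 :: tl with harr
    have hlen : arr.length = tl.length + 2 := by simp [harr]
    have hn1 : (arr.length == 1) = false := by simp [hlen]
    have hg0 : PySem.List.pyGet? arr 0 = some a0 := by
      rw [harr]
      simp [PySem.List.pyGet?, PySem.List.pyIdx?, show (0:Int) ≤ ↑tl.length + 1 from by omega]
    have hg1 : PySem.List.pyGet? arr 1 = some a1 := by
      rw [harr]
      simp [PySem.List.pyGet?, PySem.List.pyIdx?]
    rw [is_mountain_valley_pattern, is_mountain_valley_pattern_alt]
    simp only [hn1, hg0, hg1, Bool.false_eq_true, if_false]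
    by_cases heq : a0 = a1
    · -- both return 0 via the first adjacent equality
      have hE : ((List.range (arr.length - 1)).any (fun i => arr.getD i 0 == arr.getD (i+1) 0)) = true := by
        rw [List.any_eq_true]
        exact ⟨0, by simp [hlen], by simp [harr, heq]⟩
      have h01 : (a0 == a1) = true := by simp [heq]
      rw [h01, hE]
      simp
    · rw [if_neg (by simp [heq])]
      have hinc : decide (a0 < a1) = pvSign arr 0 := by simp [pvSign, harr]
      rw [hinc]
      have hiff := pvLoopA_eq_one_iff arr (arr.length - 2) (pvSign arr 0) 1 (Nat.le_refl 1)
        (by omega) rfl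
      by_cases hQ : ∀ j, 1 ≤ j → j + 1 < arr.length →
          (arr.getD j 0 ≠ arr.getD (j+1) 0 ∧ pvSign arr j ≠ pvSign arr (j-1))
      · rw [hiff.mpr hQ]
        have hE : ((List.range (arr.length - 1)).any (fun i => arr.getD i 0 == arr.getD (i+1) 0)) = false := by
          rw [List.any_eq_false]
          intro i hi
          rw [List.mem_range] at hi
          rcases Nat.eq_zero_or_pos i with rfl | hpos
          · simp [harr, heq]
          · simp only [beq_iff_eq]
            exact (hQ i hpos (by omega)).1
        have hS : ((List.range' 1 (arr.length - 1 - 1)).any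
            (fun j => ((List.range (arr.length - 1)).map (fun i => decide (arr.getD i 0 < arr.getD (i+1) 0))).getD j false
              == ((List.range (arr.length - 1)).map (fun i => decide (arr.getD i 0 < arr.getD (i+1) 0))).getD (j-1) false)) = false := by
          rw [List.any_eq_false]
          intro j hj
          rw [List.mem_range'_1] at hj
          rw [pvSigns_getD arr j (by omega), pvSigns_getD arr (j-1) (by omega)]
          simp only [beq_iff_eq]
          exact (hQ j hj.1 (by omega)).2
        rw [hE, hS]
        simp
      · have h0 : pvLoopA arr (pvSign arr 0) 1 (arr.length - 2) = 0 := by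
          rcases pvLoopA_zero_or_one arr (arr.length - 2) (pvSign arr 0) 1 with h | h
          · exact h
          · exact absurd (hiff.mp h) hQ
        rw [h0]
        push Not at hQ
        obtain ⟨j, hj1, hj2, hj3⟩ := hQ
        by_cases hE : ((List.range (arr.length - 1)).any (fun i => arr.getD i 0 == arr.getD (i+1) 0)) = true
        · rw [hE]
          simp
        · rw [Bool.not_eq_true] at hE
          have hne' : arr.getD j 0 ≠ arr.getD (j+1) 0 := by
            rw [List.any_eq_false] at hE
            have := hE j (by rw [List.mem_range]; omega)
            simpa using this
          have hsg : pvSign arr j = pvSign arr (j-1) := hj3 hne'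
          have hS : ((List.range' 1 (arr.length - 1 - 1)).any
              (fun j => ((List.range (arr.length - 1)).map (fun i => decide (arr.getD i 0 < arr.getD (i+1) 0))).getD j false
                == ((List.range (arr.length - 1)).map (fun i => decide (arr.getD i 0 < arr.getD (i+1) 0))).getD (j-1) false)) = true := by
            rw [List.any_eq_true]
            refine ⟨j, ?_, ?_⟩
            · rw [List.mem_range'_1]; omega
            rw [pvSigns_getD arr j (by omega), pvSigns_getD arr (j-1) (by omega), hsg]
            simp
          rw [hE, hS]
          simp

-- ===== VERDICT (by name: the statement is the Claim_ definition above) =====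
theorem is_mountain_valley_pattern_spec : Claim_equal_is_mountain_valley_pattern := by
  intro arr _ hpre
  unfold Spec_is_mountain_valley_pattern
  exact pv_main arr hpre
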